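-- pv_equiv track=rewrite | github.com/yaroslavchybar/bot-auto-ig | python/runners/workflow/bootstrap.py | _find_start_node
-- ===== SOURCE A (Python) =====
-- from typing import Any, Dict, List, Optional
--
-- def _find_start_node(nodes: List[Dict[str, Any]]) -> Optional[Dict[str, Any]]:
--     for node in nodes:
--         if node.get('type') == 'start':
--             return node
--     for node in nodes:
--         if str(node.get('id')) == 'start_node':
--             return node
--     return None
-- ===== SOURCE B (Python) =====
-- from typing import Any, Dict, List, Optional
--
-- def _find_start_node(nodes: List[Dict[str, Any]]) -> Optional[Dict[str, Any]]:
--     fallback = None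
--     for node in nodes:
--         if node.get('type') == 'start':
--             return node
--         if fallback is None and str(node.get('id')) == 'start_node':
--             fallback = node
--     return fallback
-- ===== Notes on version B (the rewrite author's own statement) =====
-- stated objective: simpler
-- what changed: Replaces A's two sequential passes over nodes with a single pass that returns a type=='start' node immediately and records the first id=='start_node' node as a fallback returned after the loop.
import Mathlib
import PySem

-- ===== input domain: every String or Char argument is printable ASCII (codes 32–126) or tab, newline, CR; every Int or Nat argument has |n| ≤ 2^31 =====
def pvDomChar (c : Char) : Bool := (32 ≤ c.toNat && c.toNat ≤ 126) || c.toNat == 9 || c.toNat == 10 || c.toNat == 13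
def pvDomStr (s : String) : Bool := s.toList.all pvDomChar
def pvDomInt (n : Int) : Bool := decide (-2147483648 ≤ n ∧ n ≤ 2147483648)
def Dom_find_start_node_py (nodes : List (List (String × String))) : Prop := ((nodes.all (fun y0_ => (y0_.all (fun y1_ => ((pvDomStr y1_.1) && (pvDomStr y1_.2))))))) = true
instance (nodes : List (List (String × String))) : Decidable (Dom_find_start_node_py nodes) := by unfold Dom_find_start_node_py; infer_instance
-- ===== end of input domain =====

-- B replaces A's two sequential passes with one pass keeping a first-id-match fallback (objective: simpler).
-- ===== PORT A =====
-- node.get(k): first-match lookup in the association list (Python dict lookup)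
def pvGetKey (node : List (String × String)) (k : String) : Option String :=
  (node.find? (fun p => p.1 == k)).map (fun p => p.2)

-- str(node.get('id')): a missing key is None, whose str() is "None"
def pvIdStr (node : List (String × String)) : String :=
  match pvGetKey node "id" with
  | some s => s
  | none => "None"

def find_start_node_py (nodes : List (List (String × String))) : Option (List (String × String)) :=
  -- first pass: return the first node with node.get('type') == 'start'
  match nodes.find? (fun node => pvGetKey node "type" == some "start") with
  | some n => some n
  | none =>
    -- second pass: return the first node with str(node.get('id')) == 'start_node'
    nodes.find? (fun node => pvIdStr node == "start_node")

-- ===== PORT B =====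
-- single pass: early return on type=='start', fallback records the FIRST id match
def pvAltLoop (nodes : List (List (String × String))) (fb : Option (List (String × String))) :
    Option (List (String × String)) :=
  match nodes with
  | [] => fb
  | node :: rest =>
    if pvGetKey node "type" == some "start" then some node
    else pvAltLoop rest
      (if fb.isNone && (pvIdStr node == "start_node") then some node else fb)

def find_start_node_py_alt (nodes : List (List (String × String))) : Option (List (String × String)) :=
  pvAltLoop nodes none

-- ===== PRECONDITION & SPEC =====
def Spec_find_start_node_py (nodes : List (List (String × String))) (out : Option (List (String × String))) : Prop := out = find_start_node_py_alt nodes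
instance (nodes : List (List (String × String))) (out : Option (List (String × String))) : Decidable (Spec_find_start_node_py nodes out) := by unfold Spec_find_start_node_py; infer_instance

-- ===== CLAIM (what is proved, stated in full; the proofs are below) =====
def Claim_equal_find_start_node_py : Prop := ∀ (nodes : List (List (String × String))), Dom_find_start_node_py nodes → Spec_find_start_node_py nodes (find_start_node_py nodes)

-- ===== LEMMAS AND PROOFS =====

-- ===== VERDICT (by name: the statement is the Claim_ definition above) =====
lemma pvAltLoop_spec (nodes : List (List (String × String)))
    (fb : Option (List (String × String))) :
    pvAltLoop nodes fb =
      match nodes.find? (fun node => pvGetKey node "type" == some "start") with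
      | some n => some n
      | none => fb.or (nodes.find? (fun node => pvIdStr node == "start_node")) := by
  induction nodes generalizing fb with
  | nil => cases fb <;> simp [pvAltLoop]
  | cons node rest ih =>
    simp only [pvAltLoop, List.find?]
    by_cases ht : (pvGetKey node "type" == some "start") = true
    · simp [ht]
    · simp only [Bool.not_eq_true] at ht
      rw [ht, ih]
      by_cases hid : (pvIdStr node == "start_node") = true
      · cases fb <;> simp [hid, Option.or]
      · simp only [Bool.not_eq_true] at hid
        simp [hid]

theorem find_start_node_py_spec : Claim_equal_find_start_node_py := by
  intro nodes _
  unfold Spec_find_start_node_py find_start_node_py find_start_node_py_alt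
  rw [pvAltLoop_spec]
  cases nodes.find? (fun node => pvGetKey node "type" == some "start") <;> simp [Option.or]
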